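-- pv_equiv track=rewrite | github.com/juwkim/boj | 백준/Gold/14890. 경사로/경사로.py | solve
-- ===== SOURCE A (Python) =====
-- def solve(line: list[int], L: int) -> bool:
--     cur, cnt = None, 0
--     idx = 0
--     while idx < len(line):
--         if cur == None:
--             cur = line[idx]
--             cnt = 1
--         elif cur == line[idx]:
--             cnt += 1
--         elif cur + 1 == line[idx]:
--             if cnt < L:
--                 return False
--             cur, cnt = line[idx], 1
--         elif cur - 1 == line[idx]:
--             if len(line) < idx + L:
--                 return False
--             if any(num != line[idx] for num in line[idx+1:idx+L]):
--                 return False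
--             idx += L - 1
--             cur, cnt = line[idx], 0
--         else:
--             return False
--         idx += 1
--     return True
-- ===== SOURCE B (Python) =====
-- def solve(line: list[int], L: int) -> bool:
--     n = len(line)
--     used = set()
--     for i in range(n - 1):
--         h0, h1 = line[i], line[i + 1]
--         if h0 == h1:
--             continue
--         if h1 == h0 + 1:
--             if i - L + 1 < 0:
--                 return False
--             if any(line[j] != h0 or j in used for j in range(i - L + 1, i + 1)):
--                 return False
--             used.update(range(i - L + 1, i + 1))
--         elif h1 == h0 - 1:
--             if i + L >= n:
--                 return False
--             if any(line[j] != h1 or j in used for j in range(i + 1, i + L + 1)):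
--                 return False
--             used.update(range(i + 1, i + L + 1))
--         else:
--             return False
--     return True
-- ===== Notes on version B (the rewrite author's own statement) =====
-- stated objective: alternative
-- what changed: Replaces A's single-pass running-count state machine (cur/cnt with an index jump after a descent) by an explicit set of used cell indices with a backward window scan at each ascent and a forward window scan at each descent.
-- outside the precondition, e.g. on solve([1, 0], 0): A does not finish within the time limit, B returns True; on solve([1, 1], 0): A returns True, B returns True
import Mathlib
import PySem

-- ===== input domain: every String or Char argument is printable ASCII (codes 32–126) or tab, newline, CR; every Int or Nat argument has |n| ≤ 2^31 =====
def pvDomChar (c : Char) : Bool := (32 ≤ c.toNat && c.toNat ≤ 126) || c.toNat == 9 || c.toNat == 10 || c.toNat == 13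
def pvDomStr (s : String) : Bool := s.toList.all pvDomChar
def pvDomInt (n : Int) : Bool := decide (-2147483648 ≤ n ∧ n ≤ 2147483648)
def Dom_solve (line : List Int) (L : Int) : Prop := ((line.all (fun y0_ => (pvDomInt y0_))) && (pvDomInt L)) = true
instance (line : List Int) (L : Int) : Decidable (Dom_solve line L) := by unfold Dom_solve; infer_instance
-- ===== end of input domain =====

-- B replaces A's running-count state machine by an explicit set of used cell indices with
-- backward/forward window scans at each height change (objective: alternative; not faster).

-- shared helper: line[j] for an index known to be in range (fallback 0 is never reached on Pre_)
def pvCell (line : List Int) (j : Int) : Int := (PySem.List.pyGet? line j).getD 0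

-- ===== PORT A =====
-- fuel, for totality only: it runs out only when L ≤ 0 (outside Pre_), since idx advances
-- by at least 1 per iteration when L ≥ 1.
def solveLoop (line : List Int) (L : Int) : Nat → Int → Option Int → Int → Bool
  | 0, _, _, _ => true
  | fuel+1, idx, cur, cnt =>
    if idx < (line.length : Int) then
      match cur with
      | none => solveLoop line L fuel (idx+1) (some (pvCell line idx)) 1
      | some c =>
        if c = pvCell line idx then solveLoop line L fuel (idx+1) (some c) (cnt+1)
        else if c + 1 = pvCell line idx then
          if cnt < L then false else solveLoop line L fuel (idx+1) (some (pvCell line idx)) 1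
        else if c - 1 = pvCell line idx then
          if (line.length : Int) < idx + L then false
          else if (PySem.List.slice line (some (idx+1)) (some (idx+L))).any
                    (fun num => num != pvCell line idx) then false
          else
            solveLoop line L fuel ((idx + (L-1)) + 1) (some (pvCell line (idx + (L-1)))) 0
        else false
    else true

def solve (line : List Int) (L : Int) : Bool :=
  solveLoop line L (line.length + 1) 0 none 0

-- ===== PORT B =====
def altLoop (line : List Int) (L : Int) (i : Nat) (used : PySem.Set Int) : Bool :=
  if _h : i + 1 < line.length then
    let h0 := pvCell line i
    let h1 := pvCell line ((i : Int) + 1)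
    if h0 = h1 then altLoop line L (i+1) used
    else if h1 = h0 + 1 then
      if (i : Int) - L + 1 < 0 then false
      else if (PySem.List.pyRange ((i : Int) - L + 1) ((i : Int) + 1) 1).any
                (fun j => (pvCell line j != h0) || PySem.Set.contains used j) then false
      else altLoop line L (i+1)
             (PySem.Set.update used (PySem.List.pyRange ((i : Int) - L + 1) ((i : Int) + 1) 1))
    else if h1 = h0 - 1 then
      if (i : Int) + L ≥ (line.length : Int) then false
      else if (PySem.List.pyRange ((i : Int) + 1) ((i : Int) + L + 1) 1).any
                (fun j => (pvCell line j != h1) || PySem.Set.contains used j) then false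
      else altLoop line L (i+1)
             (PySem.Set.update used (PySem.List.pyRange ((i : Int) + 1) ((i : Int) + L + 1) 1))
    else false
  else true
termination_by line.length - i

def solve_alt (line : List Int) (L : Int) : Bool :=
  altLoop line L 0 PySem.Set.empty

-- ===== PRECONDITION & SPEC =====
-- Pre_ excludes L ≤ 0, on which A's descent branch can decrement idx and loop forever
-- (e.g. line=[1,0], L=0 diverges); ramp length L is at least 1 in the problem.
def Pre_solve (line : List Int) (L : Int) : Prop := 1 ≤ L
instance (line : List Int) (L : Int) : Decidable (Pre_solve line L) := by unfold Pre_solve; infer_instance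
def pvWitness_solve : List Int × Int := ([1, 1, 2, 2, 1, 1], 2)
def Spec_solve (line : List Int) (L : Int) (out : Bool) : Prop := out = solve_alt line L
instance (line : List Int) (L : Int) (out : Bool) : Decidable (Spec_solve line L out) := by unfold Spec_solve; infer_instance

-- ===== CLAIM (what is proved, stated in full; the proofs are below) =====
def Claim_equal_solve : Prop := ∀ (line : List Int) (L : Int), Dom_solve line L → Pre_solve line L → Spec_solve line L (solve line L)

-- ===== LEMMAS AND PROOFS =====

theorem pvCell_eq_getElem (line : List Int) (j : Int) (h0 : 0 ≤ j) :
    pvCell line j = line.getD j.toNat 0 := by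
  simp [pvCell, PySem.List.pyGet?_of_nonneg line h0, List.getD_eq_getElem?_getD]

-- B skips over a stretch of equal neighbours without touching `used`
theorem altLoop_skip (line : List Int) (L : Int) :
    ∀ (d k : Nat) (used : PySem.Set Int),
      k + d < line.length →
      (∀ j : Nat, k ≤ j → j < k + d → pvCell line j = pvCell line ((j : Int) + 1)) →
      altLoop line L k used = altLoop line L (k + d) used := by
  intro d
  induction d with
  | zero => intro k used _ _; rfl
  | succ d ih =>
    intro k used hlen heq
    rw [altLoop]
    have hk1 : k + 1 < line.length := by omega
    rw [dif_pos hk1]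
    have h01 : pvCell line k = pvCell line ((k : Int) + 1) := heq k le_rfl (by omega)
    simp only [h01]
    have hidx : k + (d + 1) = (k + 1) + d := by omega
    rw [hidx]
    exact ih (k+1) used (by omega) (by intro j hj1 hj2; exact heq j (by omega) (by omega))

theorem slice_eq_map (line : List Int) :
    ∀ (d : Nat) (a b : Int), 0 ≤ a → a ≤ b → b ≤ (line.length : Int) → (b - a).toNat = d →
      PySem.List.slice line (some a) (some b) = (PySem.List.pyRange a b 1).map (pvCell line) := by
  intro d
  induction d with
  | zero =>
    intro a b ha hab hb hd
    have hba : b = a := by omega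
    subst hba
    rw [PySem.List.slice_toNat line ha ha, PySem.List.pyRange_one_eq_nil le_rfl]
    simp
  | succ d ih =>
    intro a b ha hab hb hd
    have hlt : a < b := by omega
    rw [PySem.List.slice_toNat line ha (by omega)]
    rw [List.drop_eq_getElem_cons (by omega : a.toNat < line.length)]
    rw [show b.toNat - a.toNat = d + 1 from by omega]
    rw [List.take_succ_cons]
    rw [PySem.List.pyRange_one_cons hlt, List.map_cons]
    congr 1
    · rw [pvCell_eq_getElem line a ha, List.getD_eq_getElem line 0 (by omega)]
    · have hrec := ih (a+1) b (by omega) (by omega) hb (by omega)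
      rw [PySem.List.slice_toNat line (by omega) (by omega)] at hrec
      rw [show (a+1).toNat = a.toNat + 1 from by omega,
          show b.toNat - (a.toNat + 1) = d from by omega] at hrec
      exact hrec

-- main loop correspondence: A at idx = i+1 with cur = line[i], run counter cnt,
-- B at i with used-set `used`
theorem loop_eq (line : List Int) (L : Int) (hL : 1 ≤ L) :
    ∀ (fuel : Nat) (i : Nat) (cnt : Int) (used : PySem.Set Int),
      (line.length : Int) - (i : Int) ≤ (fuel : Int) →
      (i : Int) < (line.length : Int) + 1 →
      0 ≤ cnt → cnt ≤ (i : Int) + 1 →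
      (∀ j : Int, (i : Int) + 1 - cnt ≤ j → j ≤ (i : Int) → pvCell line j = pvCell line i ∧ j ∉ used) →
      (0 ≤ (i : Int) - cnt → ¬ (pvCell line ((i : Int) - cnt) = pvCell line i ∧ ((i : Int) - cnt) ∉ used)) →
      (∀ j ∈ used, 0 ≤ j ∧ j ≤ (i : Int)) →
      solveLoop line L fuel ((i : Int) + 1) (some (pvCell line i)) cnt = altLoop line L i used := by
  intro fuel
  induction fuel with
  | zero =>
    intro i cnt used hfuel hi _ _ _ _ _
    rw [altLoop, dif_neg (by omega)]
    rfl
  | succ fuel ih =>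
    intro i cnt used hfuel hi hc0 hc1 hwin hmax hused
    have hL' : ((L.toNat : Nat) : Int) = L := Int.toNat_of_nonneg (by omega)
    by_cases hin : (i : Int) + 1 < (line.length : Int)
    · have hiN : i + 1 < line.length := by omega
      rw [altLoop]
      simp only [dif_pos hiN]
      simp only [solveLoop, if_pos hin]
      by_cases hcx : pvCell line i = pvCell line ((i : Int) + 1)
      · -- equal neighbours
        rw [if_pos hcx, if_pos hcx]
        have H := ih (i+1) (cnt+1) used (by push_cast; omega) (by push_cast; omega)
          (by omega) (by push_cast; omega)
          (by
            push_cast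
            intro j hj1 hj2
            by_cases hj : j ≤ (i : Int)
            · obtain ⟨he, hm⟩ := hwin j (by omega) hj
              exact ⟨he.trans hcx, hm⟩
            · have hj' : j = (i : Int) + 1 := by omega
              subst hj'
              exact ⟨rfl, fun hmem => by have := (hused _ hmem).2; omega⟩)
          (by
            push_cast
            intro hnn
            rintro ⟨he, hm⟩
            exact hmax (by omega)
              ⟨by rw [show (i : Int) + 1 - (cnt + 1) = (i : Int) - cnt from by ring] at he
                  exact he.trans hcx.symm,
               by rw [show (i : Int) + 1 - (cnt + 1) = (i : Int) - cnt from by ring] at hm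
                  exact hm⟩)
          (by intro j hj; exact ⟨(hused j hj).1, by have := (hused j hj).2; push_cast; omega⟩)
        push_cast at H
        rw [← hcx] at H
        exact H
      · rw [if_neg hcx, if_neg hcx]
        by_cases hasc : pvCell line i + 1 = pvCell line ((i : Int) + 1)
        · -- ascent
          rw [if_pos hasc, if_pos hasc.symm]
          by_cases hcl : cnt < L
          · -- A fails: show B fails too
            rw [if_pos hcl]
            by_cases hlo : (i : Int) - L + 1 < 0
            · rw [if_pos hlo]
            · rw [if_neg hlo]
              have hj0 : ((PySem.List.pyRange ((i : Int) - L + 1) ((i : Int) + 1) 1).any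
                  (fun j => (pvCell line j != pvCell line i) || PySem.Set.contains used j)) = true := by
                rw [List.any_eq_true]
                refine ⟨(i : Int) - cnt, ?_, ?_⟩
                · rw [PySem.List.mem_pyRange_one]; omega
                · have := hmax (by omega)
                  rw [Bool.or_eq_true, bne_iff_ne, PySem.Set.contains_iff]
                  by_cases hee : pvCell line ((i : Int) - cnt) = pvCell line i
                  · right; by_contra hmm; exact this ⟨hee, hmm⟩
                  · left; exact hee
              rw [if_pos hj0]
          · -- A recurses; show B's window check passes
            rw [if_neg hcl]
            rw [if_neg (show ¬((i : Int) - L + 1 < 0) from by omega)]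
            have hwinok : ((PySem.List.pyRange ((i : Int) - L + 1) ((i : Int) + 1) 1).any
                (fun j => (pvCell line j != pvCell line i) || PySem.Set.contains used j)) = false := by
              rw [List.any_eq_false]
              intro j hj
              rw [PySem.List.mem_pyRange_one] at hj
              obtain ⟨he, hm⟩ := hwin j (by omega) (by omega)
              simp [he, hm]
            rw [hwinok, if_neg Bool.false_ne_true]
            have H := ih (i+1) 1 (PySem.Set.update used (PySem.List.pyRange ((i : Int) - L + 1) ((i : Int) + 1) 1))
              (by push_cast; omega) (by push_cast; omega) (by omega) (by push_cast; omega)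
              (by
                push_cast
                intro j hj1 hj2
                have hj : j = (i : Int) + 1 := by omega
                subst hj
                refine ⟨rfl, fun hmem => ?_⟩
                rw [PySem.Set.mem_update] at hmem
                rcases hmem with hmem | hmem
                · have := (hused _ hmem).2; omega
                · rw [PySem.List.mem_pyRange_one] at hmem; omega)
              (by
                push_cast
                intro hnn
                rintro ⟨he, -⟩
                rw [show (i : Int) + 1 - 1 = (i : Int) from by ring] at he
                exact hcx he)
              (by
                intro j hj
                rw [PySem.Set.mem_update] at hj
                rcases hj with hj | hj
                · exact ⟨(hused j hj).1, by have := (hused j hj).2; push_cast; omega⟩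
                · rw [PySem.List.mem_pyRange_one] at hj
                  exact ⟨by omega, by push_cast; omega⟩)
            push_cast at H
            exact H
        · rw [if_neg hasc,
                if_neg (show ¬(pvCell line ((i : Int) + 1) = pvCell line i + 1) from fun h => hasc h.symm)]
          by_cases hdesc : pvCell line i - 1 = pvCell line ((i : Int) + 1)
          · -- descent
            rw [if_pos hdesc, if_pos hdesc.symm]
            by_cases hfit : (line.length : Int) ≤ (i : Int) + L
            · rw [if_pos (show (line.length : Int) < (i : Int) + 1 + L from by omega),
                  if_pos (show (i : Int) + L ≥ (line.length : Int) from hfit)]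
            · rw [if_neg (show ¬((line.length : Int) < (i : Int) + 1 + L) from by omega),
                  if_neg (show ¬((i : Int) + L ≥ (line.length : Int)) from hfit)]
              -- A's slice check as a range check
              have hsl := slice_eq_map line (L - 1).toNat ((i : Int) + 1 + 1) ((i : Int) + 1 + L)
                (by omega) (by omega) (by omega) (by omega)
              rw [hsl, List.any_map]
              -- B's window: peel off its first cell i+1 (equal to x, unused)
              rw [PySem.List.pyRange_one_cons (show (i : Int) + 1 < (i : Int) + L + 1 from by omega),
                  List.any_cons]
              have hfirst : ((pvCell line ((i : Int) + 1) != pvCell line ((i : Int) + 1)) ||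
                  PySem.Set.contains used ((i : Int) + 1)) = false := by
                simp only [bne_self_eq_false, Bool.false_or]
                rw [← Bool.not_eq_true, PySem.Set.contains_iff]
                intro hmem
                have := (hused _ hmem).2; omega
              rw [hfirst, Bool.false_or]
              rw [show (i : Int) + 1 + 1 = (i : Int) + 2 from by ring,
                  show (i : Int) + 1 + L = (i : Int) + L + 1 from by ring]
              have hpred : ∀ j ∈ PySem.List.pyRange ((i : Int) + 2) ((i : Int) + L + 1) 1,
                  ((pvCell line j != pvCell line ((i : Int) + 1)) || PySem.Set.contains used j)
                    = ((fun num => num != pvCell line ((i : Int) + 1)) ∘ pvCell line) j := by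
                intro j hj
                rw [PySem.List.mem_pyRange_one] at hj
                have hcu : PySem.Set.contains used j = false := by
                  rw [← Bool.not_eq_true, PySem.Set.contains_iff]
                  intro hmem
                  have := (hused _ hmem).2; omega
                rw [hcu, Bool.or_false]
                rfl
              rw [PySem.List.any_congr_mem hpred]
              by_cases hany : ((PySem.List.pyRange ((i : Int) + 2) ((i : Int) + L + 1) 1).any
                  ((fun num => num != pvCell line ((i : Int) + 1)) ∘ pvCell line)) = true
              · rw [if_pos hany, if_pos hany]
              · rw [if_neg hany, if_neg hany]
                -- all consumed cells equal x := pvCell (i+1)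
                have hall : ∀ j : Int, (i : Int) + 1 ≤ j → j < (i : Int) + L + 1 →
                    pvCell line j = pvCell line ((i : Int) + 1) := by
                  intro j hj1 hj2
                  by_cases hj : j = (i : Int) + 1
                  · rw [hj]
                  · have hmem : j ∈ PySem.List.pyRange ((i : Int) + 2) ((i : Int) + L + 1) 1 := by
                      rw [PySem.List.mem_pyRange_one]; omega
                    have := List.any_eq_false.mp (Bool.not_eq_true _ ▸ hany) j hmem
                    simpa [Function.comp, bne_iff_ne] using this
                -- B walks across the consumed stretch on equal-neighbour steps
                have hmemu : ∀ j : Int,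
                    j ∈ PySem.Set.update used
                      (((i : Int) + 1) :: PySem.List.pyRange ((i : Int) + 2) ((i : Int) + L + 1) 1) ↔
                    j ∈ used ∨ ((i : Int) + 1 ≤ j ∧ j < (i : Int) + L + 1) := by
                  intro j
                  rw [PySem.Set.mem_update, List.mem_cons, PySem.List.mem_pyRange_one]
                  constructor
                  · rintro (h | h | h)
                    · exact Or.inl h
                    · exact Or.inr (by omega)
                    · exact Or.inr (by omega)
                  · rintro (h | h)
                    · exact Or.inl h
                    · by_cases hj1 : j = (i : Int) + 1
                      · exact Or.inr (Or.inl hj1)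
                      · exact Or.inr (Or.inr (by omega))
                have hskip := altLoop_skip line L (L.toNat - 1) (i+1)
                  (PySem.Set.update used
                    (((i : Int) + 1) :: PySem.List.pyRange ((i : Int) + 2) ((i : Int) + L + 1) 1))
                  (by omega)
                  (by
                    intro j hj1 hj2
                    have e1 := hall j (by omega) (by omega)
                    have e2 := hall ((j : Int) + 1) (by omega) (by omega)
                    rw [e1, e2])
                rw [hskip]
                rw [show (i + 1) + (L.toNat - 1) = i + L.toNat from by omega]
                have H := ih (i + L.toNat) 0
                  (PySem.Set.update used
                    (((i : Int) + 1) :: PySem.List.pyRange ((i : Int) + 2) ((i : Int) + L + 1) 1))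
                  (by push_cast [hL']; omega) (by push_cast [hL']; omega) (by omega)
                  (by push_cast [hL']; omega)
                  (by intro j hj1 hj2; exact absurd (hj1.trans hj2) (by omega))
                  (by
                    intro hnn
                    rintro ⟨-, hm⟩
                    exact hm ((hmemu _).mpr (Or.inr (by push_cast [hL']; omega))))
                  (by
                    intro j hj
                    rcases (hmemu j).mp hj with hj | hj
                    · exact ⟨(hused j hj).1, by have := (hused j hj).2; push_cast [hL']; omega⟩
                    · exact ⟨by omega, by push_cast [hL']; omega⟩)
                push_cast [hL'] at H
                rw [show (i : Int) + 1 + (L - 1) = (i : Int) + L from by ring]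
                exact H
          · rw [if_neg hdesc,
                  if_neg (show ¬(pvCell line ((i : Int) + 1) = pvCell line i - 1) from fun h => hdesc h.symm)]
    · rw [altLoop, dif_neg (by omega)]
      simp only [solveLoop, if_neg (show ¬((i : Int) + 1 < (line.length : Int)) from hin)]

-- ===== VERDICT (by name: the statement is the Claim_ definition above) =====
theorem solve_spec : Claim_equal_solve := by
  unfold Claim_equal_solve Spec_solve Pre_solve
  intro line L _ hL
  unfold solve solve_alt
  by_cases hn : (0 : Int) < (line.length : Int)
  · simp only [solveLoop, if_pos hn]
    have H := loop_eq line L hL line.length 0 1 PySem.Set.empty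
      (by push_cast; omega) (by push_cast; omega) (by omega) (by norm_num)
      (by
        push_cast
        intro j hj1 hj2
        have hj : j = 0 := by omega
        subst hj
        exact ⟨rfl, fun h => by simp [PySem.Set.empty] at h⟩)
      (by intro h; exact absurd h (by norm_num))
      (by intro j hj; simp [PySem.Set.empty] at hj)
    push_cast at H
    exact H
  · simp only [solveLoop, if_neg hn]
    rw [altLoop, dif_neg (by omega)]
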